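-- pv_equiv track=rewrite | github.com/curvesy/OSIRIS | core/test_governance_modules/governance/risk_engine.py | _get_max_severity
-- ===== SOURCE A (Python) =====
-- from typing import Dict, Any, List
--
-- def _get_max_severity(evidence_log: List[Dict[str, Any]]) -> str:
--     """Get maximum severity level from evidence."""
--     severity_levels = ['low', 'medium', 'high', 'critical']
--     max_severity = 'low'
--
--     for evidence in evidence_log:
--         if isinstance(evidence, dict):
--             severity = evidence.get('severity', '').lower()
--             if severity in severity_levels:
--                 if severity_levels.index(severity) > severity_levels.index(max_severity):
--                     max_severity = severity
--
--     return max_severity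
-- ===== SOURCE B (Python) =====
-- def _get_max_severity(evidence_log):
--     """Get maximum severity level from evidence."""
--     seen = set()
--     for evidence in evidence_log:
--         if isinstance(evidence, dict):
--             seen.add(evidence.get('severity', '').lower())
--     for level in ('critical', 'high', 'medium', 'low'):
--         if level in seen:
--             return level
--     return 'low'
-- ===== Notes on version B (the rewrite author's own statement) =====
-- stated objective: simpler
-- what changed: Replaces the running-max accumulator with its repeated list.index() comparisons by a two-phase collect-then-scan: one pass gathers every lowercased severity into a set, then the four levels are scanned from highest to lowest and the first one present is returned ('low' as fallback).
import Mathlib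
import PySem

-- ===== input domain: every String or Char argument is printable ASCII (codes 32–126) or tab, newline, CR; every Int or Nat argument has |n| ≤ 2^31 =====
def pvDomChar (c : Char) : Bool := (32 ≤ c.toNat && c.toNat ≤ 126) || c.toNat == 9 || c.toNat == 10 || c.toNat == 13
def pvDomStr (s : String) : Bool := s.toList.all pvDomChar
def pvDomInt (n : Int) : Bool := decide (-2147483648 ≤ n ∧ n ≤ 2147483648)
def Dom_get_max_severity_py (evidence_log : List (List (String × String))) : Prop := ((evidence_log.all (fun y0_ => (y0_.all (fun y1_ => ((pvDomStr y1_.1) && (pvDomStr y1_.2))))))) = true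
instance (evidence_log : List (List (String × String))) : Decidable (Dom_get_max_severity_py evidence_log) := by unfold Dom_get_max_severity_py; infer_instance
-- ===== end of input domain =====

-- B replaces A's running-max-with-.index()-comparisons by a collect-all-severities-into-a-set
-- pass followed by a highest-first scan of the four levels (same results; simpler two-phase flow).


-- ===== PORT A =====
-- shared helper: evidence.get('severity', '').lower()  (both Pythons contain this expression)
def pvSev (evidence : List (String × String)) : String :=
  PySem.Str.lower (PySem.Dict.getD (PySem.Dict.mk evidence) "severity" "")

def pvLevelsA : List String := ["low", "medium", "high", "critical"]

-- the body of A's for-loop (every element of the typed input is a dict, so the isinstance test is always true)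
def pvStepA (max_severity : String) (evidence : List (String × String)) : String :=
  let severity := pvSev evidence
  if severity ∈ pvLevelsA then
    if (PySem.List.index? pvLevelsA severity).getD 0 > (PySem.List.index? pvLevelsA max_severity).getD 0 then
      severity
    else max_severity
  else max_severity

def get_max_severity_py (evidence_log : List (List (String × String))) : String :=
  evidence_log.foldl pvStepA "low"

-- ===== PORT B =====
def get_max_severity_py_alt (evidence_log : List (List (String × String))) : String :=
  let seen : PySem.Set String :=
    evidence_log.foldl (fun acc evidence => PySem.Set.add acc (pvSev evidence)) PySem.Set.empty
  (List.find? (fun level => PySem.Set.contains seen level) ["critical", "high", "medium", "low"]).getD "low"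

-- ===== PRECONDITION & SPEC =====
def Spec_get_max_severity_py (evidence_log : List (List (String × String))) (out : String) : Prop := out = get_max_severity_py_alt evidence_log
instance (evidence_log : List (List (String × String))) (out : String) : Decidable (Spec_get_max_severity_py evidence_log out) := by unfold Spec_get_max_severity_py; infer_instance

-- ===== CLAIM (what is proved, stated in full; the proofs are below) =====
def Claim_equal_get_max_severity_py : Prop := ∀ (evidence_log : List (List (String × String))), Dom_get_max_severity_py evidence_log → Spec_get_max_severity_py evidence_log (get_max_severity_py evidence_log)

-- ===== LEMMAS AND PROOFS =====

-- proof-only abstractions: the rank of a severity string and the level of a given rank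
def pvRank (s : String) : Nat :=
  if s = "critical" then 3 else if s = "high" then 2 else if s = "medium" then 1 else 0

def pvPick (n : Nat) : String :=
  if 3 ≤ n then "critical" else if 2 ≤ n then "high" else if 1 ≤ n then "medium" else "low"

def pvBest (ss : List String) : Nat := ss.foldr (fun s r => max (pvRank s) r) 0

lemma pvRank_ge3 (s : String) : 3 ≤ pvRank s ↔ s = "critical" := by
  unfold pvRank; split_ifs <;> simp_all

lemma pvRank_ge2 (s : String) : 2 ≤ pvRank s ↔ s = "critical" ∨ s = "high" := by
  unfold pvRank; split_ifs <;> simp_all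

lemma pvRank_ge1 (s : String) : 1 ≤ pvRank s ↔ s = "critical" ∨ s = "high" ∨ s = "medium" := by
  unfold pvRank; split_ifs <;> simp_all

lemma pvBest_ge3 (ss : List String) : 3 ≤ pvBest ss ↔ "critical" ∈ ss := by
  induction ss with
  | nil => simp [pvBest]
  | cons s ss ih =>
    simp only [pvBest, List.foldr_cons, List.mem_cons] at *
    rw [le_max_iff, ih, pvRank_ge3, eq_comm]

lemma pvBest_ge2 (ss : List String) :
    2 ≤ pvBest ss ↔ "critical" ∈ ss ∨ "high" ∈ ss := by
  induction ss with
  | nil => simp [pvBest]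
  | cons s ss ih =>
    rw [show pvBest (s :: ss) = max (pvRank s) (pvBest ss) from rfl, le_max_iff, ih, pvRank_ge2]
    simp only [List.mem_cons]
    constructor
    · rintro ((rfl | rfl) | h | h) <;> tauto
    · rintro ((h | h) | h | h) <;> first | (subst h; tauto) | tauto

lemma pvBest_ge1 (ss : List String) :
    1 ≤ pvBest ss ↔ "critical" ∈ ss ∨ "high" ∈ ss ∨ "medium" ∈ ss := by
  induction ss with
  | nil => simp [pvBest]
  | cons s ss ih =>
    rw [show pvBest (s :: ss) = max (pvRank s) (pvBest ss) from rfl, le_max_iff, ih, pvRank_ge1]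
    simp only [List.mem_cons]
    constructor
    · rintro ((rfl | rfl | rfl) | h | h | h) <;> tauto
    · rintro ((h | h) | h | h | h) <;> first | (subst h; tauto) | tauto

-- A's loop step, characterised through pvRank
lemma pvStep_core (m s : String) (hm : m ∈ pvLevelsA) :
    (if s ∈ pvLevelsA then
       (if (PySem.List.index? pvLevelsA s).getD 0 > (PySem.List.index? pvLevelsA m).getD 0 then s else m)
     else m) ∈ pvLevelsA ∧
    pvRank (if s ∈ pvLevelsA then
       (if (PySem.List.index? pvLevelsA s).getD 0 > (PySem.List.index? pvLevelsA m).getD 0 then s else m)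
     else m) = max (pvRank m) (pvRank s) := by
  by_cases hs : s ∈ pvLevelsA
  · simp only [pvLevelsA, List.mem_cons, List.not_mem_nil, or_false] at hm hs
    rcases hm with rfl | rfl | rfl | rfl <;> rcases hs with rfl | rfl | rfl | rfl <;> decide
  · have h1 : s ≠ "critical" := by rintro rfl; simp [pvLevelsA] at hs
    have h2 : s ≠ "high" := by rintro rfl; simp [pvLevelsA] at hs
    have h3 : s ≠ "medium" := by rintro rfl; simp [pvLevelsA] at hs
    have h0 : pvRank s = 0 := by simp [pvRank, h1, h2, h3]
    simp only [hs, if_false]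
    exact ⟨hm, by rw [h0]; omega⟩

lemma pvStepA_char (m : String) (e : List (String × String)) (hm : m ∈ pvLevelsA) :
    pvStepA m e ∈ pvLevelsA ∧ pvRank (pvStepA m e) = max (pvRank m) (pvRank (pvSev e)) := by
  have := pvStep_core m (pvSev e) hm
  simpa [pvStepA] using this

lemma pvPick_rank (m : String) (hm : m ∈ pvLevelsA) : pvPick (pvRank m) = m := by
  simp only [pvLevelsA, List.mem_cons, List.not_mem_nil, or_false] at hm
  rcases hm with hm | hm | hm | hm <;> subst hm <;> decide

-- A's whole fold computes pvPick of the max rank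
lemma pvFoldA (xs : List (List (String × String))) :
    ∀ m, m ∈ pvLevelsA →
      xs.foldl pvStepA m = pvPick (max (pvRank m) (pvBest (xs.map pvSev))) := by
  induction xs with
  | nil =>
    intro m hm
    simp only [List.foldl_nil, List.map_nil]
    have : pvBest [] = 0 := rfl
    rw [this, Nat.max_zero, pvPick_rank m hm]
  | cons e xs ih =>
    intro m hm
    obtain ⟨hmem, hrank⟩ := pvStepA_char m e hm
    simp only [List.foldl_cons, List.map_cons]
    rw [ih _ hmem, hrank]
    have : pvBest (pvSev e :: xs.map pvSev) = max (pvRank (pvSev e)) (pvBest (xs.map pvSev)) := rfl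
    rw [this]
    congr 1
    omega

-- B equals pvPick of the max rank as well
lemma pvAltEq (xs : List (List (String × String))) :
    get_max_severity_py_alt xs = pvPick (pvBest (xs.map pvSev)) := by
  unfold get_max_severity_py_alt
  have hmem : ∀ y : String,
      (PySem.Set.contains (xs.foldl (fun acc e => PySem.Set.add acc (pvSev e)) PySem.Set.empty) y)
        = decide (y ∈ xs.map pvSev) := by
    intro y
    rcases h : PySem.Set.contains (xs.foldl (fun acc e => PySem.Set.add acc (pvSev e)) PySem.Set.empty) y with _ | _
    · symm
      simp only [decide_eq_false_iff_not]
      intro hy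
      rw [List.mem_map] at hy
      obtain ⟨b, hb, rfl⟩ := hy
      have := (PySem.Set.contains_iff _ (pvSev b)).2
        ((PySem.Set.mem_foldl_add xs pvSev PySem.Set.empty (pvSev b)).2 (Or.inr ⟨b, hb, rfl⟩))
      rw [h] at this; exact Bool.false_ne_true this
    · symm
      simp only [decide_eq_true_iff]
      have := (PySem.Set.contains_iff _ y).1 h
      rcases (PySem.Set.mem_foldl_add xs pvSev PySem.Set.empty y).1 this with h' | ⟨b, hb, rfl⟩
      · simp [PySem.Set.empty] at h'
      · exact List.mem_map_of_mem hb
  simp only [List.find?, hmem]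
  set ss := xs.map pvSev
  by_cases h3 : "critical" ∈ ss
  · have : 3 ≤ pvBest ss := (pvBest_ge3 ss).2 h3
    simp [h3, pvPick, this]
  · by_cases h2 : "high" ∈ ss
    · have hb2 : 2 ≤ pvBest ss := (pvBest_ge2 ss).2 (Or.inr h2)
      have hb3 : ¬ 3 ≤ pvBest ss := fun h => h3 ((pvBest_ge3 ss).1 h)
      simp [h3, h2, pvPick, hb2, hb3]
    · by_cases h1 : "medium" ∈ ss
      · have hb1 : 1 ≤ pvBest ss := (pvBest_ge1 ss).2 (Or.inr (Or.inr h1))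
        have hb3 : ¬ 3 ≤ pvBest ss := fun h => h3 ((pvBest_ge3 ss).1 h)
        have hb2 : ¬ 2 ≤ pvBest ss := fun h => by
          rcases (pvBest_ge2 ss).1 h with h | h <;> [exact h3 h; exact h2 h]
        simp [h3, h2, h1, pvPick, hb1, hb2, hb3]
      · have hb0 : pvBest ss = 0 := by
          have hb1 : ¬ 1 ≤ pvBest ss := fun h => by
            rcases (pvBest_ge1 ss).1 h with h | h | h <;> [exact h3 h; exact h2 h; exact h1 h]
          omega
        by_cases h0 : "low" ∈ ss <;> simp [h3, h2, h1, h0, pvPick, hb0]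

-- ===== VERDICT (by name: the statement is the Claim_ definition above) =====
theorem get_max_severity_py_spec : Claim_equal_get_max_severity_py := by
  intro evidence_log _
  unfold Spec_get_max_severity_py get_max_severity_py
  rw [pvFoldA evidence_log "low" (by decide), pvAltEq]
  have : pvRank "low" = 0 := rfl
  rw [this, Nat.zero_max]
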